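-- pv_equiv track=rewrite | github.com/faderskd/algorithms | olimpiady.py | kolejka_w_sklepie
-- ===== SOURCE A (Python) =====
-- def kolejka_w_sklepie(queue):
--     begin_persons = 0
--     persons = 0
--     for p in queue:
--         if p == 0:
--             persons += 1
--         else:
--             persons -= 1
--         if persons < 0:
--             begin_persons += 1
--             persons = 0
--     return begin_persons
-- ===== SOURCE B (Python) =====
-- def kolejka_w_sklepie(queue):
--     steps = [1 if p == 0 else -1 for p in queue]
--     prefix = []
--     total = 0
--     for s in steps:
--         total += s
--         prefix.append(total)
--     return -min([0] + prefix)
-- ===== Notes on version B (the rewrite author's own statement) =====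
-- stated objective: alternative
-- what changed: Replaces the clamp-to-zero in-loop deficit counter with a staged pipeline: map the queue to +/-1 steps, materialise the prefix-sum list, and return the negated minimum of 0 and those prefix sums via the built-in min.
import Mathlib
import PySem

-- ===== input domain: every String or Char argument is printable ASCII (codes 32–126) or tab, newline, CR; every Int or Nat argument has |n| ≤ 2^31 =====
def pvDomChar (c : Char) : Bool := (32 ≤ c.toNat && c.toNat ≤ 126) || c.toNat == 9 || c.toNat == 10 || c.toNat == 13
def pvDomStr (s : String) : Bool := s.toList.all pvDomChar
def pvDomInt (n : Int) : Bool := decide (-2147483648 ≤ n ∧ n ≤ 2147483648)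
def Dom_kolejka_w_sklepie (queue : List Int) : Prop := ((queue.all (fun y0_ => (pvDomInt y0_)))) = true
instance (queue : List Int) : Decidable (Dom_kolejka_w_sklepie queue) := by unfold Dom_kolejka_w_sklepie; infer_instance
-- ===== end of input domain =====

-- B replaces A's clamp-to-zero counter loop with a staged pipeline: ±1 steps, prefix-sum list, negated minimum (alternative decomposition, same cost).

-- ===== PORT A =====
-- state = (begin_persons, persons)
def kolejka_w_sklepie (queue : List Int) : Int :=
  (queue.foldl (fun (s : Int × Int) p =>
      let persons := if p == 0 then s.2 + 1 else s.2 - 1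
      if persons < 0 then (s.1 + 1, 0) else (s.1, persons)) (0, 0)).1

-- ===== PORT B =====
-- the prefix-sum loop of Source B: running total, list of partial sums
def pvPrefix (total : Int) : List Int → List Int
  | [] => []
  | s :: rest => (total + s) :: pvPrefix (total + s) rest

def kolejka_w_sklepie_alt (queue : List Int) : Int :=
  -(let steps := queue.map (fun p => if p == 0 then (1 : Int) else -1)
    let pre := pvPrefix 0 steps
    (PySem.List.min? ((0 : Int) :: pre) (fun x => x)).getD 0)

-- ===== PRECONDITION & SPEC =====
def Spec_kolejka_w_sklepie (queue : List Int) (out : Int) : Prop := out = kolejka_w_sklepie_alt queue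
instance (queue : List Int) (out : Int) : Decidable (Spec_kolejka_w_sklepie queue out) := by unfold Spec_kolejka_w_sklepie; infer_instance

-- ===== CLAIM =====
def Claim_equal_kolejka_w_sklepie : Prop := ∀ (queue : List Int), Dom_kolejka_w_sklepie queue → Spec_kolejka_w_sklepie queue (kolejka_w_sklepie queue)

-- ===== LEMMAS AND PROOFS =====

-- Invariant: A's fold from (begin, persons) equals the negated running minimum of the
-- prefix sums from bal, folded below minb, provided persons = bal - minb, begin = -minb, persons ≥ 0.
theorem kolejka_fold_min (qs : List Int) (begin persons bal minb : Int)
    (h1 : persons = bal - minb) (h2 : begin = -minb) (h3 : 0 ≤ persons) :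
    (qs.foldl (fun (s : Int × Int) p =>
        let persons := if p == 0 then s.2 + 1 else s.2 - 1
        if persons < 0 then (s.1 + 1, 0) else (s.1, persons)) (begin, persons)).1
    = -((pvPrefix bal (qs.map (fun p => if p == 0 then (1 : Int) else -1))).foldl min minb) := by
  induction qs generalizing begin persons bal minb with
  | nil => simp [pvPrefix, h2]
  | cons p qs ih =>
    simp only [List.foldl_cons, List.map_cons, pvPrefix]
    by_cases hp : p == 0 <;> simp only [hp, if_true] <;> split_ifs <;>
      · rw [ih] <;> omega

-- ===== VERDICT =====
theorem kolejka_w_sklepie_spec : Claim_equal_kolejka_w_sklepie := by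
  intro queue _
  unfold Spec_kolejka_w_sklepie kolejka_w_sklepie kolejka_w_sklepie_alt
  simp only [PySem.List.min?_id_cons, Option.getD_some]
  exact kolejka_fold_min queue 0 0 0 0 (by ring) (by ring) le_rfl
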